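-- pv_equiv track=rewrite | github.com/Mavchi/tira-kertaus | 2_Tehokkuus/exercises/bothsame.py | count
-- ===== SOURCE A (Python) =====
-- def count(s):
--     d = {}
--     count = 0
--     for c in s:
--         if c not in d:
--             d[c] = 1
--         else:
--             d[c] += 1
--         count += d[c]
--     return count
-- ===== SOURCE B (Python) =====
-- def count(s):
--     d = {}
--     for c in s:
--         d[c] = d.get(c, 0) + 1
--     total = 0
--     for k in d.values():
--         total += k * (k + 1) // 2
--     return total
-- ===== Notes on version B (the rewrite author's own statement) =====
-- stated objective: alternative
-- what changed: B builds the full frequency table first and then sums the closed form k*(k+1)//2 over each character's final count, instead of A's single pass that adds the running per-character count at every position.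
import Mathlib
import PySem

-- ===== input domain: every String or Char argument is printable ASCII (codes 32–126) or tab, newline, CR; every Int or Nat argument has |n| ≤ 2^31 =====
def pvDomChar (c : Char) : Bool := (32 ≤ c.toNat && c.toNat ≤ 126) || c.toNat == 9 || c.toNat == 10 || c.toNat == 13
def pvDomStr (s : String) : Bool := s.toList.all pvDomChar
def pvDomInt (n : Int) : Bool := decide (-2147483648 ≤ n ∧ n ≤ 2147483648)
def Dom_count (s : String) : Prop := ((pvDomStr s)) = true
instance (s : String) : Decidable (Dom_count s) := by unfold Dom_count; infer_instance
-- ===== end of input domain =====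

-- B replaces A's single incremental pass by a two-phase computation: build the
-- frequency table, then sum the closed form k*(k+1)//2 over the final counts
-- (objective: alternative decomposition, same asymptotic cost).

-- ===== PORT A =====
def count (s : String) : Int :=
  (s.toList.foldl
    (fun (st : PySem.Dict Char Int × Int) c =>
      let d := if st.1.contains c = false then st.1.insert c 1
               else st.1.modify c 0 (· + 1)
      (d, st.2 + d.getD c 0))
    (PySem.Dict.empty, 0)).2

-- ===== PORT B =====
def count_alt (s : String) : Int :=
  let d := s.toList.foldl (fun d c => d.insert c (d.getD c 0 + 1))
             (PySem.Dict.empty : PySem.Dict Char Int)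
  d.values.foldl (fun total k => total + PySem.Int.floordiv (k * (k + 1)) 2) 0

-- ===== PRECONDITION & SPEC =====
def Spec_count (s : String) (out : Int) : Prop := out = count_alt s
instance (s : String) (out : Int) : Decidable (Spec_count s out) := by unfold Spec_count; infer_instance

-- ===== CLAIM (what is proved, stated in full; the proofs are below) =====
def Claim_equal_count : Prop := ∀ (s : String), Dom_count s → Spec_count s (count s)

-- ===== LEMMAS AND PROOFS =====

-- the triangular term k*(k+1)//2 as B computes it
def pvTri (n : Int) : Int := PySem.Int.floordiv (n * (n + 1)) 2

theorem pvTri_succ (n : Int) : pvTri (n + 1) = pvTri n + (n + 1) := by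
  show PySem.Int.floordiv ((n + 1) * (n + 1 + 1)) 2 = PySem.Int.floordiv (n * (n + 1)) 2 + (n + 1)
  have h : (n + 1) * (n + 1 + 1) = n * (n + 1) + 2 * (n + 1) := by ring
  show Int.fdiv ((n + 1) * (n + 1 + 1)) 2 = Int.fdiv (n * (n + 1)) 2 + (n + 1)
  rw [h, Int.add_mul_fdiv_left _ _ (by norm_num)]

-- A's per-character dict update is exactly the counter update
theorem pvStep_eq (d : PySem.Dict Char Int) (c : Char) :
    (if d.contains c = false then d.insert c 1 else d.modify c 0 (· + 1))
      = d.insert c (d.getD c 0 + 1) := by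
  by_cases h : d.contains c = false
  · rw [if_pos h]
    have hg : d.getD c 0 = 0 := PySem.Dict.getD_of_not_contains _ _ h
    rw [hg]
    norm_num
  · rw [if_neg h]
    rfl

-- sum over a Nodup list where f and g agree except at the (unique) element c
theorem pvSum_update {f g : Char → Int} {δ : Int} (c : Char) :
    ∀ (ks : List Char), ks.Nodup → c ∈ ks →
    (∀ k ∈ ks, k ≠ c → f k = g k) → f c = g c + δ →
    (ks.map f).sum = (ks.map g).sum + δ := by
  intro ks
  induction ks with
  | nil => intro _ h; simp at h
  | cons a t ih =>
      intro hnd hmem hagree hc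
      rcases List.mem_cons.mp hmem with rfl | hmt
      · have ht : ∀ k ∈ t, f k = g k := by
          intro k hk
          exact hagree k (List.mem_cons_of_mem _ hk)
            (fun he => (List.nodup_cons.mp hnd).1 (he ▸ hk))
        simp only [List.map_cons, List.sum_cons, hc, List.map_congr_left ht]
        ring
      · have ha : f a = g a := hagree a (List.mem_cons_self)
          (fun he => (List.nodup_cons.mp hnd).1 (he ▸ hmt))
        simp only [List.map_cons, List.sum_cons, ha,
          ih (List.nodup_cons.mp hnd).2 hmt
            (fun k hk hne => hagree k (List.mem_cons_of_mem _ hk) hne) hc]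
        ring

-- the sum B computes, as a function of the raw character list
def pvS (l : List Char) : Int :=
  ((PySem.Set.ofList l).map (fun k => pvTri ((l.count k : Int)))).sum

theorem pvS_append (l : List Char) (c : Char) :
    pvS (l ++ [c]) = pvS l + ((l.count c : Int) + 1) := by
  unfold pvS
  rw [PySem.Set.ofList_append_singleton]
  by_cases hc : c ∈ l
  · have hmem : c ∈ PySem.Set.ofList l := (PySem.Set.mem_ofList l c).mpr hc
    have hadd : (PySem.Set.ofList l).add c = PySem.Set.ofList l := by
      unfold PySem.Set.add
      simp [hmem]
    rw [hadd]
    refine pvSum_update c (PySem.Set.ofList l) (PySem.Set.nodup_ofList l) hmem ?_ ?_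
    · intro k _ hne
      simp [List.count_append, Ne.symm hne]
    · have : ((l ++ [c]).count c : Int) = (l.count c : Int) + 1 := by
        simp [List.count_append]
      rw [this, pvTri_succ]
  · have hmem : c ∉ PySem.Set.ofList l := fun h => hc ((PySem.Set.mem_ofList l c).mp h)
    have hadd : (PySem.Set.ofList l).add c = PySem.Set.ofList l ++ [c] := by
      unfold PySem.Set.add
      simp [hmem]
    rw [hadd]
    have hcnt0 : l.count c = 0 := List.count_eq_zero.mpr hc
    have hagree : ∀ k ∈ PySem.Set.ofList l,
        pvTri (((l ++ [c]).count k : Int)) = pvTri ((l.count k : Int)) := by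
      intro k hk
      have hne : k ≠ c := fun he => hmem (he ▸ hk)
      simp [List.count_append, Ne.symm hne]
    simp only [List.map_append, List.sum_append, List.map_cons, List.map_nil,
      List.sum_cons, List.sum_nil, List.map_congr_left hagree]
    have : ((l ++ [c]).count c : Int) = 1 := by
      simp [List.count_append, hcnt0]
    rw [this]
    have h1 : pvTri 1 = 1 := by decide
    rw [h1, hcnt0]
    simp

-- A's fold state: the dict is the counter, the accumulator is pvS
theorem pvA_inv (l : List Char) :
    (l.foldl
      (fun (st : PySem.Dict Char Int × Int) c =>
        let d := if st.1.contains c = false then st.1.insert c 1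
                 else st.1.modify c 0 (· + 1)
        (d, st.2 + d.getD c 0))
      (PySem.Dict.empty, 0))
      = (PySem.Dict.counter l, pvS l) := by
  induction l using List.reverseRecOn with
  | nil =>
      simp [pvS, PySem.Dict.counter, PySem.Set.ofList]
  | append_singleton t c ih =>
      rw [List.foldl_append, ih]
      simp only [List.foldl_cons, List.foldl_nil]
      rw [pvStep_eq]
      have hd : (PySem.Dict.counter t).insert c ((PySem.Dict.counter t).getD c 0 + 1)
          = PySem.Dict.counter (t ++ [c]) := by
        rw [← PySem.Dict.foldl_insert_getD_add_one_eq_counter (t ++ [c]),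
            ← PySem.Dict.foldl_insert_getD_add_one_eq_counter t,
            List.foldl_append]
        simp
      rw [hd]
      have hv : ((PySem.Dict.counter (t ++ [c])).getD c 0) = (t.count c : Int) + 1 := by
        rw [PySem.Dict.getD_counter]
        simp [List.count_append]
      rw [hv, pvS_append]

theorem pvB_eq_pvS (l : List Char) :
    (l.foldl (fun d c => d.insert c (d.getD c 0 + 1))
        (PySem.Dict.empty : PySem.Dict Char Int)).values.foldl
      (fun total k => total + PySem.Int.floordiv (k * (k + 1)) 2) 0 = pvS l := by
  rw [PySem.Dict.foldl_insert_getD_add_one_eq_counter]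
  rw [PySem.List.foldl_add]
  unfold pvS
  have hv : (PySem.Dict.counter l).values
      = (PySem.Set.ofList l).map (fun k => ((l.count k : Nat) : Int)) := by
    show (PySem.Dict.counter l).items.map (·.2) = _
    rw [PySem.Dict.items_counter]
    simp [List.map_map, Function.comp]
  rw [hv, List.map_map]
  simp [pvTri, Function.comp_def]

-- ===== VERDICT (by name: the statement is the Claim_ definition above) =====
theorem count_spec : Claim_equal_count := by
  intro s _
  show count s = count_alt s
  unfold count count_alt
  rw [pvA_inv, pvB_eq_pvS]
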